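-- pv_equiv track=rewrite | github.com/adamlynam/advent-2025 | src/day6.py | parse_cephalopod_problems
-- ===== SOURCE A (Python) =====
-- def split_rows(lines: list[str]) -> list[list[str]]:
--     return [line.split() for line in lines]
--
-- def parse_cephalopod_digit(cephalopod_digit: str) -> str:
--     if cephalopod_digit == " ":
--         return ""
--
--     return cephalopod_digit
--
-- def parse_cephalopod_numbers(lines: list[str]) -> list[list[int]]:
--     cephalopod_numbers = list()
--     for i in range(len(lines[0])):
--         cephalopod_number = "0"
--         for j in range(len(lines)):
--             cephalopod_number = cephalopod_number + parse_cephalopod_digit(lines[j][i])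
--         cephalopod_numbers.append(int(cephalopod_number))
--     return cephalopod_numbers
--
-- def group_cephalopod_numbers(cephalopod_numbers: list[int]):
--     grouped_cephalopod_numbers = list()
--     current_group = list()
--     for number in cephalopod_numbers:
--         if number == 0:
--             grouped_cephalopod_numbers.append(current_group)
--             current_group = list()
--         else:
--             current_group.append(number)
--     grouped_cephalopod_numbers.append(current_group)
--     return grouped_cephalopod_numbers
--
-- def parse_cephalopod_problems(lines: list[str]) -> list[list[int], bool]:
--     problems = list()
--     rows = split_rows(lines)
--     cephalopod_numbers = parse_cephalopod_numbers(lines[:-1])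
--     grouped_cephalopod_numbers = group_cephalopod_numbers(cephalopod_numbers)
--     operator_row = rows[len(rows) - 1]
--     for i in range(len(operator_row)):
--         problems.append(
--             (
--                 grouped_cephalopod_numbers[i],
--                 operator_row[i] == "+",
--             )
--         )
--     return problems
-- ===== SOURCE B (Python) =====
-- def split_on_zero(nums: list[int]) -> list[list[int]]:
--     if 0 in nums:
--         k = nums.index(0)
--         return [nums[:k]] + split_on_zero(nums[k + 1:])
--     return [nums]
--
-- def parse_cephalopod_problems(lines: list[str]) -> list[list[int], bool]:
--     width = len(lines[0])
--     cols = [''] * width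
--     for row in lines[:-1]:
--         cols = [acc + ('' if row[i] == ' ' else row[i]) for i, acc in enumerate(cols)]
--     nums = [int('0' + col) for col in cols]
--     groups = split_on_zero(nums)
--     return [(groups[i], token == '+') for i, token in enumerate(lines[-1].split())]
-- ===== Notes on version B (the rewrite author's own statement) =====
-- stated objective: alternative
-- what changed: B replaces A's column-major nested loops (one pass per column over all rows building a digit string) and its running-accumulator grouping fold by a single row-major pass that maintains one accumulator per column, followed by a recursive split-at-first-zero (via nums.index(0) and slicing) instead of A's (finished-groups, current-group) fold, and pairs groups with the operator tokens via enumerate instead of an index loop.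
import Mathlib
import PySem

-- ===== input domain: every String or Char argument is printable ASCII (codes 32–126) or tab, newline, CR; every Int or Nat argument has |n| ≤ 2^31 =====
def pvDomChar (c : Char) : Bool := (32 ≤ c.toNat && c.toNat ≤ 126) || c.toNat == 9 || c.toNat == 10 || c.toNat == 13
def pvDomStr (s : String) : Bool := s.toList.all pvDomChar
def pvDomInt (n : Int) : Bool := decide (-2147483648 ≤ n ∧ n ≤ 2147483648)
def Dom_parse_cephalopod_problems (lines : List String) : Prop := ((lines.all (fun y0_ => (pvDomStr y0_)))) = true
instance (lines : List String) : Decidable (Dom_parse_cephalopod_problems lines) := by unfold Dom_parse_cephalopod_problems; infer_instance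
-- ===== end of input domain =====

-- B replaces A's column-major nested loops and accumulator-fold grouping by a single row-major pass
-- maintaining per-column accumulators and a recursive split-at-first-zero grouping (objective: alternative).


-- ===== PORT A =====
def pv_split_rows (lines : List String) : List (List String) :=
  lines.map PySem.Str.split₀

-- Python's 1-char string lines[j][i] is modelled as a List Char ([] where Python would raise IndexError,
-- which Pre_ excludes).
def pv_charAt (s : String) (i : Int) : List Char :=
  match PySem.Str.pyGet? s i with
  | some c => [c]
  | none => []

def pv_parse_cephalopod_digit (d : List Char) : List Char :=
  if d == [' '] then [] else d

def pv_parse_cephalopod_numbers (lines : List String) : List Int :=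
  (PySem.List.pyRange 0 (PySem.Str.len (PySem.List.pyGetD lines 0 ""))).foldl
    (fun acc i =>
      acc ++ [(PySem.Int.ofChars?
        ((PySem.List.pyRange 0 (lines.length : Int)).foldl
          (fun cs j => cs ++ pv_parse_cephalopod_digit (pv_charAt (PySem.List.pyGetD lines j "") i))
          ['0'])).getD 0]) []

def pv_group_cephalopod_numbers (nums : List Int) : List (List Int) :=
  let st := nums.foldl
    (fun (st : List (List Int) × List Int) n =>
      if n == 0 then (st.1 ++ [st.2], []) else (st.1, st.2 ++ [n]))
    ([], [])
  st.1 ++ [st.2]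

def parse_cephalopod_problems (lines : List String) : List (List Int × Bool) :=
  let rows := pv_split_rows lines
  let grouped := pv_group_cephalopod_numbers
    (pv_parse_cephalopod_numbers (PySem.List.slice lines none (some (-1))))
  let opRow := PySem.List.pyGetD rows ((rows.length : Int) - 1) []
  (PySem.List.pyRange 0 (opRow.length : Int)).foldl
    (fun acc i =>
      acc ++ [(PySem.List.pyGetD grouped i [], PySem.List.pyGetD opRow i "" == "+")]) []

-- ===== PORT B =====
-- "acc + ('' if row[i] == ' ' else row[i])" — the per-column accumulator step of B's row-major pass
-- ([] where Python would raise IndexError, which Pre_ excludes).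
def pvB_digit (row : String) (i : Int) (acc : List Char) : List Char :=
  match PySem.Str.pyGet? row i with
  | some c => if c == ' ' then acc else acc ++ [c]
  | none => acc

-- split_on_zero: "if 0 in nums: k = nums.index(0); return [nums[:k]] + split_on_zero(nums[k+1:])"
-- ('0 in nums' + '.index' fused into index?, which is none exactly when 0 ∉ nums;
-- nums[:k] / nums[k+1:] with these nonnegative in-range bounds are take / drop).
def pvB_split (ns : List Int) : List (List Int) :=
  match h : PySem.List.index? ns 0 with
  | some k => ns.take k :: pvB_split (ns.drop (k + 1))
  | none => [ns]
termination_by ns.length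
decreasing_by
  obtain ⟨hk, -, -⟩ := PySem.List.getElem_of_index?_eq_some h
  simp only [List.length_drop]; omega

def parse_cephalopod_problems_alt (lines : List String) : List (List Int × Bool) :=
  let width := PySem.Str.len (PySem.List.pyGetD lines 0 "")
  let cols := (PySem.List.slice lines none (some (-1))).foldl
    (fun (cols : List (List Char)) row =>
      (PySem.List.enumerate cols).map (fun p => pvB_digit row p.1 p.2))
    (List.replicate width.toNat [])
  let nums := cols.map (fun col => (PySem.Int.ofChars? ('0' :: col)).getD 0)
  let groups := pvB_split nums
  (PySem.List.enumerate (PySem.Str.split₀ (PySem.List.pyGetD lines (-1) ""))).map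
    (fun p => (PySem.List.pyGetD groups p.1 [], p.2 == "+"))

-- ===== PRECONDITION & SPEC =====
-- the int-literal Python A builds for column i: '0' followed by the non-space characters of the column
def pvColChars (lines : List String) (i : Nat) : List Char :=
  '0' :: (lines.dropLast.map (fun s => s.toList.getD i ' ')).filter (fun c => decide (c ≠ ' '))

-- Pre_ excludes exactly the inputs on which Python A raises: fewer than two lines (IndexError on
-- lines[:-1][0]), a number row shorter than the first line (IndexError on lines[j][i]), a column whose
-- non-space characters are not a valid int literal (ValueError in int()), or more operator tokens than
-- number groups (IndexError on grouped_cephalopod_numbers[i]).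
def Pre_parse_cephalopod_problems (lines : List String) : Prop :=
  2 ≤ lines.length ∧
  (∀ s ∈ lines.dropLast, (lines.headD "").toList.length ≤ s.toList.length) ∧
  (∀ i < (lines.headD "").toList.length, (PySem.Int.ofChars? (pvColChars lines i)).isSome = true) ∧
  (PySem.Str.split₀ (lines.getLastD "")).length ≤
    (List.range (lines.headD "").toList.length).countP
      (fun i => PySem.Int.ofChars? (pvColChars lines i) == some 0) + 1
instance (lines : List String) : Decidable (Pre_parse_cephalopod_problems lines) := by
  unfold Pre_parse_cephalopod_problems; infer_instance

def pvWitness_parse_cephalopod_problems : List String := ["1 2", "+ *"]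

def Spec_parse_cephalopod_problems (lines : List String) (out : List (List Int × Bool)) : Prop := out = parse_cephalopod_problems_alt lines
instance (lines : List String) (out : List (List Int × Bool)) : Decidable (Spec_parse_cephalopod_problems lines out) := by unfold Spec_parse_cephalopod_problems; infer_instance

-- ===== CLAIM (what is proved, stated in full; the proofs are below) =====
def Claim_equal_parse_cephalopod_problems : Prop := ∀ (lines : List String), Dom_parse_cephalopod_problems lines → Pre_parse_cephalopod_problems lines → Spec_parse_cephalopod_problems lines (parse_cephalopod_problems lines)

-- ===== LEMMAS AND PROOFS =====

-- B's accumulator step appends exactly A's parsed digit for that row and column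
lemma pvB_digit_eq (row : String) (i : Int) (acc : List Char) :
    pvB_digit row i acc = acc ++ pv_parse_cephalopod_digit (pv_charAt row i) := by
  unfold pvB_digit pv_charAt pv_parse_cephalopod_digit
  cases PySem.Str.pyGet? row i with
  | none => simp
  | some c =>
    by_cases hc : c = ' '
    · simp [hc]
    · simp [hc]

-- mapping over the enumeration of a range-indexed list is mapping over the range
lemma pv_enum_map_range {α β : Type} (g : Nat → α) (h : Int → α → β) (w : Nat) :
    (PySem.List.enumerate ((List.range w).map g)).map (fun p => h p.1 p.2)
      = (List.range w).map (fun (i : Nat) => h (i : Int) (g i)) := by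
  induction w with
  | zero => simp [PySem.List.enumerate_nil]
  | succ n ih =>
    simp only [List.range_succ, List.map_append, PySem.List.enumerate_append,
      List.map_singleton, PySem.List.enumerate_cons, PySem.List.enumerate_nil, ih]
    simp

-- invariant of B's row-major pass: after folding the rows, slot i holds its start value followed by
-- the column-i digits of the rows, in row order
lemma pv_cols_inv (rows : List String) (w : Nat) (f : Nat → List Char) :
    rows.foldl
      (fun cols row => (PySem.List.enumerate cols).map (fun p => pvB_digit row p.1 p.2))
      ((List.range w).map f)
    = (List.range w).map (fun (i : Nat) =>
        rows.foldl (fun cs row => cs ++ pv_parse_cephalopod_digit (pv_charAt row (i : Int))) (f i)) := by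
  induction rows generalizing f with
  | nil => rfl
  | cons r rs ih =>
    simp only [List.foldl_cons]
    rw [pv_enum_map_range]
    have hstep : (List.range w).map (fun (i : Nat) => pvB_digit r (i : Int) (f i))
        = (List.range w).map (fun (i : Nat) => f i ++ pv_parse_cephalopod_digit (pv_charAt r (i : Int))) :=
      List.map_congr_left (fun i _ => pvB_digit_eq r (i : Int) (f i))
    rw [hstep, ih]

-- unfolding lemmas for B's recursive splitter
lemma pvB_split_of_some {ns : List Int} {k : Nat} (h : PySem.List.index? ns 0 = some k) :
    pvB_split ns = ns.take k :: pvB_split (ns.drop (k + 1)) := by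
  rw [pvB_split]
  split
  · rename_i k' h'; rw [h] at h'; injection h' with hk; subst hk; rfl
  · rename_i h'; rw [h] at h'; exact absurd h' (by simp)

lemma pvB_split_of_none {ns : List Int} (h : PySem.List.index? ns 0 = none) :
    pvB_split ns = [ns] := by
  rw [pvB_split]
  split
  · rename_i k' h'; rw [h] at h'; exact absurd h' (by simp)
  · rfl

lemma pvB_split_ne_nil (ns : List Int) : pvB_split ns ≠ [] := by
  cases h : PySem.List.index? ns 0 with
  | some k => rw [pvB_split_of_some h]; simp
  | none => rw [pvB_split_of_none h]; simp

lemma pvB_split_nil : pvB_split ([] : List Int) = [[]] :=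
  pvB_split_of_none (by simp)

lemma pvB_split_zero_cons (t : List Int) : pvB_split (0 :: t) = [] :: pvB_split t := by
  rw [pvB_split_of_some (PySem.List.index?_cons_self 0 t)]
  simp

-- prepending onto the first group of a split
def pvCons (cur : List Int) : List (List Int) → List (List Int)
  | [] => [cur]
  | g :: gs => (cur ++ g) :: gs

lemma pvCons_nil_of_ne {l : List (List Int)} (h : l ≠ []) : pvCons [] l = l := by
  cases l with
  | nil => exact absurd rfl h
  | cons g gs => simp [pvCons]

lemma pvCons_pvCons (a b : List Int) (l : List (List Int)) :
    pvCons a (pvCons b l) = pvCons (a ++ b) l := by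
  cases l <;> simp [pvCons, List.append_assoc]

lemma pvB_split_ne_cons {n : Int} (hn : n ≠ 0) (t : List Int) :
    pvB_split (n :: t) = pvCons [n] (pvB_split t) := by
  cases h : PySem.List.index? t 0 with
  | none =>
    have h' : PySem.List.index? (n :: t) 0 = none := by
      rw [PySem.List.index?_cons_of_ne t hn, h]; rfl
    rw [pvB_split_of_none h', pvB_split_of_none h]
    simp [pvCons]
  | some k =>
    have h' : PySem.List.index? (n :: t) 0 = some (k + 1) := by
      rw [PySem.List.index?_cons_of_ne t hn, h]; rfl
    rw [pvB_split_of_some h', pvB_split_of_some h]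
    simp [pvCons, List.take_succ_cons]

-- A's (finished groups, current group) fold, run to the end, is B's recursive split
lemma pv_grp_pair (ns : List Int) : ∀ (gs : List (List Int)) (cur : List Int),
    (ns.foldl (fun (st : List (List Int) × List Int) n =>
        if n == 0 then (st.1 ++ [st.2], []) else (st.1, st.2 ++ [n])) (gs, cur)).1
      ++ [(ns.foldl (fun (st : List (List Int) × List Int) n =>
        if n == 0 then (st.1 ++ [st.2], []) else (st.1, st.2 ++ [n])) (gs, cur)).2]
    = gs ++ pvCons cur (pvB_split ns) := by
  induction ns with
  | nil => intro gs cur; simp [pvB_split_nil, pvCons]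
  | cons n t ih =>
    intro gs cur
    simp only [List.foldl_cons]
    by_cases h : n = 0
    · subst h
      rw [if_pos (by simp), ih (gs ++ [cur]) [], pvB_split_zero_cons,
        pvCons_nil_of_ne (pvB_split_ne_nil t)]
      simp [pvCons]
    · rw [if_neg (by simpa using h), ih gs (cur ++ [n]), pvB_split_ne_cons h t,
        pvCons_pvCons]

lemma pv_split_eq (ns : List Int) :
    pv_group_cephalopod_numbers ns = pvB_split ns := by
  unfold pv_group_cephalopod_numbers
  rw [pv_grp_pair ns [] [], pvCons_nil_of_ne (pvB_split_ne_nil ns)]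
  rfl

-- the two ports read the same row j (rows 0..n-2)
lemma pv_row_eq (lines : List String) (j : Int) (h0 : 0 ≤ j) (h1 : j < (lines.length : Int) - 1) :
    PySem.List.pyGetD lines.dropLast j "" = PySem.List.pyGetD lines j "" := by
  unfold PySem.List.pyGetD
  rw [PySem.List.pyGet?_of_nonneg _ h0, PySem.List.pyGet?_of_nonneg _ h0,
    List.getElem?_dropLast, if_pos (by omega)]

-- the operator row is the same on both sides
lemma pv_ops_eq (lines : List String) (hn : 1 ≤ lines.length) :
    PySem.List.pyGetD (pv_split_rows lines) (((pv_split_rows lines).length : Int) - 1) []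
      = PySem.Str.split₀ (PySem.List.pyGetD lines (-1) "") := by
  unfold pv_split_rows PySem.List.pyGetD
  rw [PySem.List.pyGet?_neg_one]
  have h1 : ((lines.map PySem.Str.split₀).length : Int) - 1 = ((lines.length - 1 : Nat) : Int) := by
    simp only [List.length_map]; omega
  rw [h1, PySem.List.pyGet?_natCast, List.getElem?_map, List.getLast?_eq_getElem?]
  have hx : lines[lines.length - 1]? = some (lines[lines.length - 1]'(by omega)) :=
    List.getElem?_eq_getElem (by omega)
  rw [hx]
  rfl

-- B's column-accumulator pass followed by int('0'+col) builds exactly A's column-number list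
lemma pv_nums_eq (lines : List String) (hn : 2 ≤ lines.length) :
    (lines.dropLast.foldl
        (fun (cols : List (List Char)) row =>
          (PySem.List.enumerate cols).map (fun p => pvB_digit row p.1 p.2))
        (List.replicate (PySem.Str.len (PySem.List.pyGetD lines 0 "")).toNat [])).map
      (fun col => (PySem.Int.ofChars? ('0' :: col)).getD 0)
    = pv_parse_cephalopod_numbers lines.dropLast := by
  have hw : PySem.List.pyGetD lines.dropLast 0 "" = PySem.List.pyGetD lines 0 "" :=
    pv_row_eq lines 0 le_rfl (by omega)
  unfold pv_parse_cephalopod_numbers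
  rw [PySem.List.foldl_append_singleton_eq_map, List.nil_append, hw]
  set w := (PySem.Str.len (PySem.List.pyGetD lines 0 "")).toNat with hwdef
  have hlen : PySem.Str.len (PySem.List.pyGetD lines 0 "") = (w : Int) := by
    rw [hwdef, PySem.Str.len_eq]; simp
  have hrep : (List.replicate w ([] : List Char)) = (List.range w).map (fun _ => []) := by
    simp
  rw [hlen, hrep, pv_cols_inv lines.dropLast w (fun _ => []),
    PySem.List.pyRange_zero_natCast w]
  simp only [List.map_map]
  apply List.map_congr_left
  intro i _
  have hinner := PySem.List.foldl_pyRange_zero_pyGetD' lines.dropLast ""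
    (fun cs row => cs ++ pv_parse_cephalopod_digit (pv_charAt row (i : Int))) ['0']
  simp only [Function.comp]
  rw [hinner, PySem.List.foldl_append_eq_flatMap, PySem.List.foldl_append_eq_flatMap]
  rfl

-- ===== VERDICT (by name: the statement is the Claim_ definition above) =====
theorem parse_cephalopod_problems_spec : Claim_equal_parse_cephalopod_problems := by
  intro lines _hd hpre
  obtain ⟨hn, -, -, -⟩ := hpre
  unfold Spec_parse_cephalopod_problems
  simp only [parse_cephalopod_problems, parse_cephalopod_problems_alt]
  rw [PySem.List.slice_to_neg_one, pv_ops_eq lines (by omega), pv_nums_eq lines hn, pv_split_eq,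
    PySem.List.foldl_append_singleton_eq_map, PySem.List.enumerate_eq_map_pyRange _ "",
    List.map_map]
  simp [Function.comp, PySem.List.len]
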